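-- pv_equiv track=rewrite | github.com/andr-kuz/A_TZ | main.py | group_values
-- ===== SOURCE A (Python) =====
-- from typing import Generator
--
-- def find_needle(needle: str, map: list[list[str]]) -> Generator[int, None, None]:
--     for line_i, line in enumerate(map):
--         if needle in line:
--             yield line_i
--             continue
--
-- def group_values(split_file_content: list[str], map: list[list[str]]):
--     groups = {}
--     for group_n, line in enumerate(map):
--         groups[group_n] = []
--         for value in line:
--             for line_i in find_needle(value, map):
--                 groups[group_n].append(split_file_content[line_i])
--     return groups
-- ===== SOURCE B (Python) =====
-- def group_values(split_file_content: list[str], map: list[list[str]]):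
--     # One pass builds value -> sorted row-indices index; each group is then a flat lookup.
--     index = {}
--     for i, line in enumerate(map):
--         for v in dict.fromkeys(line):
--             index.setdefault(v, []).append(i)
--     return {g: [split_file_content[i] for v in line for i in index[v]]
--             for g, line in enumerate(map)}
-- ===== Notes on version B (the rewrite author's own statement) =====
-- stated objective: faster
-- what changed: Instead of rescanning the whole map for every value occurrence (find_needle), B builds a value-to-row-indices dictionary in one pass over the map and assembles each group by direct lookups.
import Mathlib
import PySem

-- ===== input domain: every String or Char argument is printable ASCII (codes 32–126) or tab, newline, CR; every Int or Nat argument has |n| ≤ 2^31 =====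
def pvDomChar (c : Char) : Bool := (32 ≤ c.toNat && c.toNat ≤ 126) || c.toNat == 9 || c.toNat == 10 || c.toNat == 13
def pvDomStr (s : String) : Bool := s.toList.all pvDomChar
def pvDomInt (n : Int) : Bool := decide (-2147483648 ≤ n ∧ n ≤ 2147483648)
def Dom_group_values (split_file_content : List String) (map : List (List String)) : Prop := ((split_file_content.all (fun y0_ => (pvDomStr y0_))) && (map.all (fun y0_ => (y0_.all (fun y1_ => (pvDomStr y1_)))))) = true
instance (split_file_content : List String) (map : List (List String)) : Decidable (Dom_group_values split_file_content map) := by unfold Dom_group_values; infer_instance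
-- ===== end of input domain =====

-- B replaces A's per-value rescans of `map` with a value→row-indices index built in one pass (faster, asymptotic).


-- ===== PORT A =====
def find_needle (needle : String) (map : List (List String)) : List Int :=
  (PySem.List.enumerate map).foldl
    (fun acc p => if needle ∈ p.2 then acc ++ [p.1] else acc) []

def group_values (split_file_content : List String) (map : List (List String)) : List (Int × List String) :=
  ((PySem.List.enumerate map).foldl
    (fun groups p =>
      p.2.foldl
        (fun groups v =>
          (find_needle v map).foldl
            (fun groups line_i =>
              groups.insert p.1 (groups.getD p.1 [] ++ [PySem.List.pyGetD split_file_content line_i ""]))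
            groups)
        (groups.insert p.1 []))
    PySem.Dict.empty).items

-- ===== PORT B =====
def build_index (map : List (List String)) : PySem.Dict String (List Int) :=
  (PySem.List.enumerate map).foldl
    (fun d p => (PySem.List.dedup p.2).foldl
      (fun d v => d.insert v (d.getD v [] ++ [p.1])) d)
    PySem.Dict.empty

def group_values_alt (split_file_content : List String) (map : List (List String)) : List (Int × List String) :=
  let index := build_index map
  (PySem.List.enumerate map).map
    (fun p => (p.1, p.2.flatMap
      (fun v => (index.getD v []).map (fun i => PySem.List.pyGetD split_file_content i ""))))

-- ===== PRECONDITION & SPEC =====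
-- A raises IndexError (split_file_content[line_i]) exactly when some nonempty map row's index
-- reaches past split_file_content; Pre_ excludes those inputs.
def Pre_group_values (split_file_content : List String) (map : List (List String)) : Prop :=
  ∀ p ∈ PySem.List.enumerate map, p.2 = [] ∨ p.1 < (split_file_content.length : Int)
instance (split_file_content : List String) (map : List (List String)) : Decidable (Pre_group_values split_file_content map) := by unfold Pre_group_values; infer_instance

def pvWitness_group_values : List String × List (List String) :=
  (["l0", "l1"], [["a", "b"], ["b"]])

def Spec_group_values (split_file_content : List String) (map : List (List String)) (out : List (Int × List String)) : Prop := out = group_values_alt split_file_content map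
instance (split_file_content : List String) (map : List (List String)) (out : List (Int × List String)) : Decidable (Spec_group_values split_file_content map out) := by unfold Spec_group_values; infer_instance

-- ===== CLAIM (what is proved, stated in full; the proofs are below) =====
def Claim_equal_group_values : Prop := ∀ (split_file_content : List String) (map : List (List String)), Dom_group_values split_file_content map → Pre_group_values split_file_content map → Spec_group_values split_file_content map (group_values split_file_content map)

-- ===== LEMMAS AND PROOFS =====

-- value lookup in B's index = A's linear scan, filter form
def pvHits (v : String) (l : List (Int × List String)) : List Int :=
  (l.filter (fun p => decide (v ∈ p.2))).map (·.1)

lemma find_needle_eq (v : String) (map : List (List String)) :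
    find_needle v map = pvHits v (PySem.List.enumerate map) := by
  unfold find_needle pvHits
  rw [PySem.List.foldl_append_ite]
  simp

-- one row of index-building: at most one append per key
lemma row_fold_getD (L : List String) (hL : L.Nodup) (i : Int)
    (d : PySem.Dict String (List Int)) (v : String) :
    (L.foldl (fun d w => d.insert w (d.getD w [] ++ [i])) d).getD v [] =
      d.getD v [] ++ (if v ∈ L then [i] else []) := by
  induction L generalizing d with
  | nil => simp
  | cons w L ih =>
    simp only [List.foldl_cons]
    rw [ih (List.Nodup.of_cons hL)]
    by_cases hvw : v = w
    · subst hvw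
      have hvL : v ∉ L := (List.nodup_cons.mp hL).1
      simp [hvL, PySem.Dict.getD_insert_self]
    · rw [PySem.Dict.getD_insert]
      by_cases hvL : v ∈ L <;> simp [hvL, hvw]

lemma build_fold_getD (m : List (List String)) (s : Int)
    (d : PySem.Dict String (List Int)) (v : String) :
    ((PySem.List.enumerate m s).foldl
        (fun d p => (PySem.List.dedup p.2).foldl
          (fun d w => d.insert w (d.getD w [] ++ [p.1])) d) d).getD v [] =
      d.getD v [] ++ pvHits v (PySem.List.enumerate m s) := by
  induction m generalizing s d with
  | nil => simp [PySem.List.enumerate_nil, pvHits]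
  | cons L m ih =>
    rw [PySem.List.enumerate_cons]
    simp only [List.foldl_cons]
    rw [ih]
    rw [row_fold_getD _ (PySem.List.nodup_dedup L) s d v]
    simp only [PySem.List.mem_dedup]
    unfold pvHits
    by_cases hv : v ∈ L <;> simp [hv]

lemma index_getD (map : List (List String)) (v : String) :
    (build_index map).getD v [] = find_needle v map := by
  rw [find_needle_eq]
  unfold build_index
  rw [build_fold_getD]
  simp

-- A's innermost loop: repeated append at one key
lemma a_inner1 (xs : List Int) (h : Int → String)
    (d : PySem.Dict Int (List String)) (g : Int) (w : List String) :
    xs.foldl (fun d i => d.insert g (d.getD g [] ++ [h i])) (d.insert g w) =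
      d.insert g (w ++ xs.map h) := by
  induction xs generalizing w with
  | nil => simp
  | cons i xs ih =>
    simp only [List.foldl_cons]
    rw [PySem.Dict.getD_insert_self, PySem.Dict.insert_insert_self, ih]
    simp

-- A's middle loop over a row
lemma a_inner2 (L : List String) (f : String → List Int) (h : Int → String)
    (d : PySem.Dict Int (List String)) (g : Int) (w : List String) :
    L.foldl (fun d v => (f v).foldl
        (fun d i => d.insert g (d.getD g [] ++ [h i])) d) (d.insert g w) =
      d.insert g (w ++ L.flatMap (fun v => (f v).map h)) := by
  induction L generalizing w with
  | nil => simp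
  | cons v L ih =>
    simp only [List.foldl_cons]
    rw [a_inner1, ih]
    simp

lemma fst_enumerate_nodup (m : List (List String)) (s : Int) :
    ((PySem.List.enumerate m s).map (·.1)).Nodup := by
  have := PySem.List.pairwise_lt_enumerate (xs := m) (s := s)
  exact (List.pairwise_map.mpr this).imp ne_of_lt

-- ===== VERDICT (by name: the statement is the Claim_ definition above) =====
theorem group_values_spec : Claim_equal_group_values := by
  intro sfc map _ _
  unfold Spec_group_values group_values group_values_alt
  simp only []
  have hstep : ∀ (d : PySem.Dict Int (List String)) (p : Int × List String),
      p ∈ PySem.List.enumerate map →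
      (p.2.foldl (fun groups v => (find_needle v map).foldl
          (fun groups line_i =>
            groups.insert p.1 (groups.getD p.1 [] ++ [PySem.List.pyGetD sfc line_i ""]))
          groups) (d.insert p.1 [])) =
      d.insert p.1 (p.2.flatMap (fun v =>
        (find_needle v map).map (fun i => PySem.List.pyGetD sfc i ""))) := by
    intro d p _
    rw [a_inner2 p.2 (fun v => find_needle v map)
        (fun i => PySem.List.pyGetD sfc i "") d p.1 []]
    simp
  rw [PySem.List.foldl_congr_mem (PySem.List.enumerate map) _
      (fun d p => d.insert p.1 (p.2.flatMap (fun v =>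
        (find_needle v map).map (fun i => PySem.List.pyGetD sfc i ""))))
      PySem.Dict.empty hstep]
  rw [PySem.Dict.items_foldl_insert_fresh (PySem.List.enumerate map) (·.1)
      (fun p => p.2.flatMap (fun v =>
        (find_needle v map).map (fun i => PySem.List.pyGetD sfc i "")))
      PySem.Dict.empty
      (by intro a _; simp [PySem.Dict.contains_empty])
      (fst_enumerate_nodup map 0)]
  simp only [PySem.Dict.empty, List.nil_append]
  apply List.map_congr_left
  intro p _
  simp [index_getD]
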